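-- pv_equiv track=rewrite | github.com/Commit2Cosmos/MetaHackerCupSolutions | 2022/Qualification/C2_SecondSecondMeaning.py | solve
-- ===== SOURCE A (Python) =====
-- def solve(m: int, first_char: str) -> bool:
--
--     res = []
--     to_append = '-' if first_char == '.' else '.'
--
--     for i in range(1, m):
--
--         binary_str = bin(i)[2:]
--         binary_str = binary_str.zfill(9)
--         binary_str = binary_str.replace('0', '.').replace('1', '-')
--
--         res.append(to_append+binary_str)
--
--     return res
-- ===== SOURCE B (Python) =====
-- def solve(m: int, first_char: str) -> bool:
--     res = []
--     to_append = '-' if first_char == '.' else '.'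
--     if m <= 1:
--         return res
--     # odometer: symbol array for the current number, MSB first, width max(9, bit_length)
--     sym = ['.'] * 8 + ['-']          # represents 1, zero-padded to width 9
--     for _ in range(1, m):
--         res.append(to_append + ''.join(sym))
--         # increment the odometer: clear trailing '-'s, flip the next '.', grow on overflow
--         j = len(sym) - 1
--         while j >= 0 and sym[j] == '-':
--             sym[j] = '.'
--             j -= 1
--         if j >= 0:
--             sym[j] = '-'
--         else:
--             sym.insert(0, '-')
--     return res
-- ===== Notes on version B (the rewrite author's own statement) =====
-- stated objective: alternative
-- what changed: Replaces the per-element bin()/zfill/replace conversion with an incremental odometer over a dash/dot symbol array that is incremented in place (flip trailing '-'s to '.', set the next '.', grow a digit on overflow), emitting each state.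
import Mathlib
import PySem

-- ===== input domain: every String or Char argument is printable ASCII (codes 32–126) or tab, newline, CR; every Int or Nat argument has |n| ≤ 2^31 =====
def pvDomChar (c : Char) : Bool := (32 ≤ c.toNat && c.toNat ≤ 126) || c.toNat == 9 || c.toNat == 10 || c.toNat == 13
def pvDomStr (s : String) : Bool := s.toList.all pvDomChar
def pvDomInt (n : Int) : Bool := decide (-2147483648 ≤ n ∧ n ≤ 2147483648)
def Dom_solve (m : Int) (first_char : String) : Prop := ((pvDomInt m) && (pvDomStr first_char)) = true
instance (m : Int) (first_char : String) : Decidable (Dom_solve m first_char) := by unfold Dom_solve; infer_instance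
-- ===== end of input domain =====

-- B replaces the per-element bin()/zfill/replace conversion by an odometer that increments
-- a dash/dot symbol array in place and emits each state (objective: alternative algorithm).

-- ===== PORT A =====
-- bin(n)[2:] for n ≥ 1, as a list of '0'/'1' chars (MSB first); exact for every n ≥ 1
def natBin (n : Nat) : List Char :=
  if h : n = 0 then [] else natBin (n / 2) ++ [if n % 2 = 1 then '1' else '0']
decreasing_by exact Nat.div_lt_self (Nat.pos_of_ne_zero h) (by omega)

-- str.zfill(9): left-pad with '0' to minimum width 9 (never truncates)
def zfill9 (l : List Char) : List Char := List.replicate (9 - l.length) '0' ++ l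

def solve (m : Int) (first_char : String) : List String :=
  let to_append := if first_char == "." then "-" else "."
  (PySem.List.pyRange 1 m 1).foldl
    (fun res i =>
      let binary_str := natBin i.toNat        -- bin(i)[2:]; i ≥ 1 inside range(1, m)
      let binary_str := zfill9 binary_str
      let binary_str :=
        (binary_str.map (fun c => if c = '0' then '.' else c)).map
          (fun c => if c = '1' then '-' else c)
      res ++ [to_append ++ String.mk binary_str]) []

-- ===== PORT B =====
-- the while-loop carry of Source B, acting on the reversed (LSB-first) symbol list:
-- trailing '-'s become '.', the next '.' becomes '-', overflow grows one digit
def incRev : List Char → List Char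
  | [] => ['-']
  | c :: t => if c = '-' then '.' :: incRev t else '-' :: t

def altLoop : Nat → String → List Char → List String
  | 0, _, _ => []
  | k + 1, ta, sym => (ta ++ String.mk sym) :: altLoop k ta (incRev sym.reverse).reverse

def solve_alt (m : Int) (first_char : String) : List String :=
  let to_append := if first_char == "." then "-" else "."
  if m ≤ 1 then [] else altLoop (m - 1).toNat to_append (List.replicate 8 '.' ++ ['-'])

-- ===== PRECONDITION & SPEC =====
def Spec_solve (m : Int) (first_char : String) (out : List String) : Prop := out = solve_alt m first_char
instance (m : Int) (first_char : String) (out : List String) : Decidable (Spec_solve m first_char out) := by unfold Spec_solve; infer_instance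

-- ===== CLAIM (what is proved, stated in full; the proofs are below) =====
def Claim_equal_solve : Prop := ∀ (m : Int) (first_char : String), Dom_solve m first_char → Spec_solve m first_char (solve m first_char)

-- ===== LEMMAS AND PROOFS =====

-- binary digits of n, LSB first
def lsb (n : Nat) : List Char :=
  if h : n = 0 then [] else (if n % 2 = 1 then '1' else '0') :: lsb (n / 2)
decreasing_by exact Nat.div_lt_self (Nat.pos_of_ne_zero h) (by omega)

-- the combined char translation '0'→'.', '1'→'-'
def Ftr (c : Char) : Char := if c = '0' then '.' else if c = '1' then '-' else c

-- LSB-first digits padded (on the high side) to width ≥ 9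
def lsbPad (n : Nat) : List Char := lsb n ++ List.replicate (9 - (lsb n).length) '0'

-- the odometer increment, expressed on '0'/'1' lists
def incBit : List Char → List Char
  | [] => ['1']
  | c :: t => if c = '1' then '0' :: incBit t else '1' :: t

-- the symbol array representing n (MSB first)
def specStr (n : Nat) : List Char := ((lsbPad n).map Ftr).reverse

theorem lsb_zero : lsb 0 = [] := by rw [lsb]; simp

theorem lsb_pos (n : Nat) (h : n ≠ 0) :
    lsb n = (if n % 2 = 1 then '1' else '0') :: lsb (n / 2) := by
  rw [lsb]; simp [h]

theorem natBin_eq (n : Nat) : natBin n = (lsb n).reverse := by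
  induction n using Nat.strong_induction_on with
  | _ n ih =>
    by_cases h : n = 0
    · subst h; rw [natBin, lsb_zero]; simp
    · rw [natBin, lsb_pos n h]
      simp only [h, dite_false, List.reverse_cons]
      rw [ih (n / 2) (Nat.div_lt_self (Nat.pos_of_ne_zero h) (by omega))]

theorem lsb_bits (n : Nat) : ∀ c ∈ lsb n, c = '0' ∨ c = '1' := by
  induction n using Nat.strong_induction_on with
  | _ n ih =>
    by_cases h : n = 0
    · subst h; rw [lsb_zero]; simp
    · rw [lsb_pos n h]
      intro c hc
      rcases List.mem_cons.mp hc with hc | hc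
      · subst hc; split <;> simp
      · exact ih (n / 2) (Nat.div_lt_self (Nat.pos_of_ne_zero h) (by omega)) c hc

theorem incRev_map (l : List Char) (hb : ∀ c ∈ l, c = '0' ∨ c = '1') :
    incRev (l.map Ftr) = (incBit l).map Ftr := by
  induction l with
  | nil => rfl
  | cons c t ih =>
    rcases hb c (by simp) with hc | hc <;> subst hc
    · simp [incRev, incBit, Ftr]
    · simp only [List.map_cons]
      rw [show Ftr '1' = '-' from rfl,
        show incBit ('1' :: t) = '0' :: incBit t from by simp [incBit]]
      simp only [incRev, if_pos rfl, List.map_cons]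
      rw [ih (fun c hc => hb c (by simp [hc]))]
      simp [Ftr]

theorem incBit_rep (k : Nat) :
    incBit (List.replicate k '0') = '1' :: List.replicate (k - 1) '0' := by
  cases k with
  | zero => rfl
  | succ k => simp [List.replicate_succ, incBit]

theorem lsb_len_mono (n : Nat) : (lsb n).length ≤ (lsb (n + 1)).length := by
  induction n using Nat.strong_induction_on with
  | _ n ih =>
    by_cases h : n = 0
    · subst h; rw [lsb_zero, lsb_pos 1 (by omega)]; simp
    · rw [lsb_pos n h, lsb_pos (n + 1) (by omega)]
      simp only [List.length_cons]
      by_cases he : n % 2 = 0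
      · have h2 : (n + 1) / 2 = n / 2 := by omega
        rw [h2]
      · have h2 : (n + 1) / 2 = n / 2 + 1 := by omega
        rw [h2]
        have := ih (n / 2) (Nat.div_lt_self (Nat.pos_of_ne_zero h) (by omega))
        omega

theorem incBit_G (n : Nat) (hn : 1 ≤ n) : ∀ k : Nat,
    incBit (lsb n ++ List.replicate k '0') =
      lsb (n + 1) ++ List.replicate (k + (lsb n).length - (lsb (n + 1)).length) '0' := by
  induction n using Nat.strong_induction_on with
  | _ n ih =>
    intro k
    by_cases he : n % 2 = 0
    · -- n even, n ≥ 2: flip the low '0'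
      rw [lsb_pos n (by omega), lsb_pos (n + 1) (by omega)]
      simp only [if_neg (by simp [he] : ¬ n % 2 = 1), if_pos (by omega : (n + 1) % 2 = 1)]
      have h2 : (n + 1) / 2 = n / 2 := by omega
      rw [h2]
      simp [incBit, List.length_cons]
    · -- n odd: carry into the tail
      have hodd : n % 2 = 1 := by omega
      rw [lsb_pos n (by omega), lsb_pos (n + 1) (by omega)]
      simp only [if_pos hodd, if_neg (by omega : ¬ (n + 1) % 2 = 1)]
      have h2 : (n + 1) / 2 = n / 2 + 1 := by omega
      rw [h2]
      simp only [List.cons_append, incBit, if_pos rfl]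
      by_cases hz : n / 2 = 0
      · -- n = 1
        rw [hz, lsb_zero, List.nil_append, incBit_rep, lsb_pos 1 (by omega), lsb_zero]
        simp only [if_true, List.length_cons, List.length_nil, List.cons_append,
          List.nil_append, List.cons.injEq, true_and]
        norm_num
        rw [show k + 1 - 2 = k - 1 from by omega]
      · have hrec := ih (n / 2) (Nat.div_lt_self (by omega) (by omega))
          (Nat.one_le_iff_ne_zero.mpr hz) k
        rw [hrec]
        simp only [if_true, List.cons_append, List.cons.injEq, true_and, List.length_cons]
        rw [show k + ((lsb (n / 2)).length + 1) - ((lsb (n / 2 + 1)).length + 1)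
            = k + (lsb (n / 2)).length - (lsb (n / 2 + 1)).length from by omega]

theorem incBit_pad (n : Nat) (hn : 1 ≤ n) : incBit (lsbPad n) = lsbPad (n + 1) := by
  unfold lsbPad
  rw [incBit_G n hn (9 - (lsb n).length)]
  congr 2
  have := lsb_len_mono n
  omega

theorem lsbPad_bits (n : Nat) : ∀ c ∈ lsbPad n, c = '0' ∨ c = '1' := by
  intro c hc
  unfold lsbPad at hc
  rcases List.mem_append.mp hc with h | h
  · exact lsb_bits n c h
  · left; exact List.eq_of_mem_replicate h

theorem incSym_spec (n : Nat) (hn : 1 ≤ n) :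
    (incRev (specStr n).reverse).reverse = specStr (n + 1) := by
  unfold specStr
  rw [List.reverse_reverse, incRev_map _ (lsbPad_bits n), incBit_pad n hn]

theorem aStr_eq (n : Nat) :
    ((zfill9 (natBin n)).map (fun c => if c = '0' then '.' else c)).map
        (fun c => if c = '1' then '-' else c) = specStr n := by
  rw [List.map_map]
  have hF : ((fun c => if c = '1' then '-' else c) ∘ fun c => if c = '0' then '.' else c) = Ftr := by
    funext c
    simp only [Function.comp, Ftr]
    by_cases h0 : c = '0'
    · subst h0; simp
    · simp [h0]
  rw [hF, natBin_eq]
  unfold zfill9 specStr lsbPad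
  simp [Ftr]

theorem foldl_app {α β : Type} (g : α → β) (l : List α) (acc : List β) :
    l.foldl (fun r i => r ++ [g i]) acc = acc ++ l.map g := by
  induction l generalizing acc with
  | nil => simp
  | cons x t ih => simp [List.foldl_cons, ih]

theorem altLoop_eq (ta : String) (k : Nat) : ∀ n : Nat, 1 ≤ n →
    altLoop k ta (specStr n) =
      (PySem.List.pyRange (n : Int) ((n : Int) + k) 1).map
        (fun i => ta ++ String.mk (specStr i.toNat)) := by
  induction k with
  | zero =>
    intro n hn
    rw [altLoop]
    rw [PySem.List.pyRange_one_eq_nil (by simp)]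
    simp
  | succ k ih =>
    intro n hn
    rw [altLoop, incSym_spec n hn, ih (n + 1) (by omega)]
    rw [show ((n + 1 : Nat) : Int) = (n : Int) + 1 by push_cast; ring]
    rw [show ((n : Int) + 1) + (k : Int) = (n : Int) + ((k + 1 : Nat) : Int) by push_cast; ring]
    rw [PySem.List.pyRange_one_cons (show (n : Int) < (n : Int) + ((k + 1 : Nat) : Int) by push_cast; omega)]
    simp

theorem solve_eq (m : Int) (first_char : String) : solve m first_char = solve_alt m first_char := by
  unfold solve solve_alt
  by_cases hm : m ≤ 1
  · rw [if_pos hm, PySem.List.pyRange_one_eq_nil hm]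
    rfl
  · rw [if_neg hm]
    have hstart : List.replicate 8 '.' ++ ['-'] = specStr 1 := by
      simp [specStr, lsbPad, lsb, Ftr, List.replicate]
    rw [hstart, altLoop_eq _ (m - 1).toNat 1 (le_refl 1), foldl_app]
    simp only [List.nil_append, Nat.cast_one]
    rw [show (1 : Int) + ((m - 1).toNat : Int) = m by omega]
    simp only [aStr_eq]

-- ===== VERDICT (by name: the statement is the Claim_ definition above) =====
theorem solve_spec : Claim_equal_solve := by
  intro m first_char _
  unfold Spec_solve
  exact solve_eq m first_char
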